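-- pv_equiv track=rewrite | github.com/taikivvv1008-dev/loto-site | engines/scripts/verify_rules.py | loto7_hot_mix
-- ===== SOURCE A (Python) =====
-- from typing import List, Tuple, Dict, Iterable, Optional
--
-- def loto7_hot_mix(nums: List[int], past: List[List[int]], window: int = 10, hot_min_count: int = 2, need_hot_included: int = 2) -> bool:
--     # ①ホットミックス法：直近window回で2回以上出た数字＝ホット、当回にホットが2個以上含まれるか
--     recent = past[-window:] if len(past) >= window else past[:]
--     freq: Dict[int,int] = {}
--     for draw in recent:
--         for n in draw:
--             freq[n] = freq.get(n, 0) + 1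
--     hot = {n for n,c in freq.items() if c >= hot_min_count}
--     return len(set(nums) & hot) >= need_hot_included
-- ===== SOURCE B (Python) =====
-- def loto7_hot_mix(nums, past, window=10, hot_min_count=2, need_hot_included=2):
--     # Sort the window's numbers once: equal values become adjacent runs, and a
--     # run reaching hot_min_count marks a hot number - no frequency dict needed.
--     recent = past[-window:] if len(past) >= window else past[:]
--     flat = sorted(x for draw in recent for x in draw)
--     hot = set()
--     run_val, run_len = None, 0
--     for x in flat:
--         if run_val == x:
--             run_len += 1
--         else:
--             run_val, run_len = x, 1
--         if run_len >= hot_min_count: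
--             hot.add(x)
--     return sum(1 for n in set(nums) if n in hot) >= need_hot_included
-- ===== Notes on version B (the rewrite author's own statement) =====
-- stated objective: alternative
-- what changed: B replaces A's frequency dict and hot-set comprehension by sorting the window's numbers once and marking a number hot when its run of equal adjacent values reaches hot_min_count, then tallying hot members of set(nums).
import Mathlib
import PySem

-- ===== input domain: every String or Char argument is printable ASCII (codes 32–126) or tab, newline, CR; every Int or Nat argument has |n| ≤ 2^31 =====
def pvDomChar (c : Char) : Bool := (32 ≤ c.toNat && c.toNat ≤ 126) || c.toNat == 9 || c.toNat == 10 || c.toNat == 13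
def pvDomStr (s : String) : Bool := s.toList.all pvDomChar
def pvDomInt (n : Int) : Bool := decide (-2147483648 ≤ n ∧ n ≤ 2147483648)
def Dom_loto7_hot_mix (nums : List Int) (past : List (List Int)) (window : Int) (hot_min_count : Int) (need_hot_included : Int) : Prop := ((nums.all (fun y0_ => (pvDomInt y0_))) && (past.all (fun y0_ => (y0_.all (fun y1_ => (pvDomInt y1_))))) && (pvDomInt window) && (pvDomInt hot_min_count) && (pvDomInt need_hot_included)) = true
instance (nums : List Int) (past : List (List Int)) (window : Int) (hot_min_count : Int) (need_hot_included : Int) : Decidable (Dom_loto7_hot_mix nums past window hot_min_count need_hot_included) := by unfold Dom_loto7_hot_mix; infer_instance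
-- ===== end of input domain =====

-- B replaces A's frequency dict and hot-set comprehension by a sort of the window's
-- numbers: equal values become adjacent runs and a run reaching hot_min_count marks a
-- hot number (alternative algorithm, same results).

-- ===== PORT A =====
def loto7_hot_mix (nums : List Int) (past : List (List Int)) (window : Int) (hot_min_count : Int) (need_hot_included : Int) : Bool :=
  -- recent = past[-window:] if len(past) >= window else past[:]
  let recent : List (List Int) :=
    if window ≤ (past.length : Int) then PySem.List.slice past (some (-window)) none else past
  -- freq = {}; for draw in recent: for n in draw: freq[n] = freq.get(n, 0) + 1
  let freq : PySem.Dict Int Int :=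
    recent.foldl (fun d draw => draw.foldl (fun d n => d.insert n (d.getD n 0 + 1)) d) PySem.Dict.empty
  -- hot = {n for n,c in freq.items() if c >= hot_min_count}
  let hot : PySem.Set Int :=
    PySem.Set.ofList ((freq.items.filter (fun p => hot_min_count ≤ p.2)).map (fun p => p.1))
  -- return len(set(nums) & hot) >= need_hot_included
  decide (need_hot_included ≤ (PySem.Set.len (PySem.Set.inter (PySem.Set.ofList nums) hot) : Int))

-- ===== PORT B =====
-- the body of B's run-scan loop: (run_val, run_len, hot) updated by one element x
def pvStep (hmc : Int) (st : Option Int × Int × PySem.Set Int) (x : Int) : Option Int × Int × PySem.Set Int :=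
  let rl' : Int := if st.1 = some x then st.2.1 + 1 else 1
  (some x, rl', if hmc ≤ rl' then PySem.Set.add st.2.2 x else st.2.2)

def loto7_hot_mix_alt (nums : List Int) (past : List (List Int)) (window : Int) (hot_min_count : Int) (need_hot_included : Int) : Bool :=
  let recent : List (List Int) :=
    if window ≤ (past.length : Int) then PySem.List.slice past (some (-window)) none else past
  -- flat = sorted(x for draw in recent for x in draw)
  let flat : List Int := PySem.List.sorted (recent.flatMap (fun draw => draw)) (fun x => x) false
  -- run_val, run_len = None, 0; for x in flat: ... (hot collected along the runs)
  let hot : PySem.Set Int := (flat.foldl (pvStep hot_min_count) (none, 0, PySem.Set.empty)).2.2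
  -- return sum(1 for n in set(nums) if n in hot) >= need_hot_included
  decide (need_hot_included ≤ (((PySem.Set.ofList nums).filter (fun n => hot.contains n)).map (fun _ => (1 : Int))).sum)

-- ===== PRECONDITION & SPEC =====
def Spec_loto7_hot_mix (nums : List Int) (past : List (List Int)) (window : Int) (hot_min_count : Int) (need_hot_included : Int) (out : Bool) : Prop := out = loto7_hot_mix_alt nums past window hot_min_count need_hot_included
instance (nums : List Int) (past : List (List Int)) (window : Int) (hot_min_count : Int) (need_hot_included : Int) (out : Bool) : Decidable (Spec_loto7_hot_mix nums past window hot_min_count need_hot_included out) := by unfold Spec_loto7_hot_mix; infer_instance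

-- ===== CLAIM (what is proved, stated in full; the proofs are below) =====
def Claim_equal_loto7_hot_mix : Prop := ∀ (nums : List Int) (past : List (List Int)) (window : Int) (hot_min_count : Int) (need_hot_included : Int), Dom_loto7_hot_mix nums past window hot_min_count need_hot_included → Spec_loto7_hot_mix nums past window hot_min_count need_hot_included (loto7_hot_mix nums past window hot_min_count need_hot_included)

-- ===== LEMMAS AND PROOFS =====

-- invariant of B's run-scan over a sorted list: after a processed prefix p the state
-- holds p's last element, the length of its trailing run (= its count, by sortedness),
-- and the set of values of p whose count has reached hmc

def pvInv (hmc : Int) (p : List Int) (st : Option Int × Int × PySem.Set Int) : Prop :=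
  (st.1 = none → p = [] ∧ st.2.2 = []) ∧
  (∀ l, st.1 = some l → l ∈ p ∧ (∀ v ∈ p, v ≤ l) ∧ st.2.1 = (p.count l : Int)) ∧
  (∀ v : Int, v ∈ st.2.2 ↔ v ∈ p ∧ hmc ≤ (p.count v : Int))

lemma pv_count_append_singleton (p : List Int) (x v : Int) :
    ((p ++ [x]).count v : Int) = (p.count v : Int) + (if v = x then 1 else 0) := by
  by_cases h : v = x
  · simp [h, List.count_append]
  · simp [h, Ne.symm h, List.count_append]

lemma pvInv_step (hmc : Int) (p : List Int) (x : Int) (st : Option Int × Int × PySem.Set Int)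
    (hs : ∀ v ∈ p, v ≤ x) (h : pvInv hmc p st) : pvInv hmc (p ++ [x]) (pvStep hmc st x) := by
  obtain ⟨rv, rl, hot⟩ := st
  obtain ⟨h1, h2, h3⟩ := h
  simp only [pvStep] at *
  -- count of x in p, depending on whether the run continues
  have hmemx : ∀ v, v ∈ p ++ [x] ↔ v ∈ p ∨ v = x := by intro v; simp
  by_cases hx : rv = some x
  · obtain ⟨hxl, hle, hcnt⟩ := h2 x hx
    simp only [hx, if_true] at *
    refine ⟨by simp, ?_, ?_⟩
    · intro l hl
      injection hl with hl
      subst hl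
      refine ⟨by simp, ?_, ?_⟩
      · intro v hv
        rcases (hmemx v).mp hv with hv | hv
        · exact hs v hv
        · omega
      · rw [pv_count_append_singleton, if_pos rfl, hcnt]
    · intro v
      rw [hmemx v, pv_count_append_singleton]
      by_cases hc : hmc ≤ rl + 1
      · rw [if_pos hc, PySem.Set.mem_add, h3 v]
        by_cases hv : v = x
        · subst hv
          rw [if_pos rfl]
          constructor
          · intro _; exact ⟨Or.inl hxl, by omega⟩
          · intro _; exact Or.inr rfl
        · simp only [if_neg hv]
          constructor
          · rintro (⟨hm, hcv⟩ | hveq)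
            · exact ⟨Or.inl hm, by omega⟩
            · exact absurd hveq hv
          · rintro ⟨hm | hm, hcv⟩
            · exact Or.inl ⟨hm, by omega⟩
            · exact absurd hm hv
      · rw [if_neg hc, h3 v]
        by_cases hv : v = x
        · subst hv
          rw [if_pos rfl]
          constructor
          · rintro ⟨hm, hcv⟩; rw [← hcnt] at hcv; omega
          · rintro ⟨_, hcv⟩; rw [← hcnt] at hcv; omega
        · simp only [if_neg hv]
          constructor
          · rintro ⟨hm, hcv⟩; exact ⟨Or.inl hm, by omega⟩
          · rintro ⟨hm | hm, hcv⟩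
            · exact ⟨hm, by omega⟩
            · exact absurd hm hv
  · have hxnot : x ∉ p := by
      intro hxin
      cases hrv : rv with
      | none => obtain ⟨hp, _⟩ := h1 hrv; simp [hp] at hxin
      | some l =>
        obtain ⟨hl, hle, _⟩ := h2 l hrv
        have : x = l := le_antisymm (hle x hxin) (hs l hl)
        subst this; exact hx hrv
    have hcx : p.count x = 0 := List.count_eq_zero.mpr hxnot
    simp only [hx, if_false] at *
    refine ⟨by simp, ?_, ?_⟩
    · intro l hl
      injection hl with hl
      subst hl
      refine ⟨by simp, ?_, ?_⟩
      · intro v hv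
        rcases (hmemx v).mp hv with hv | hv
        · exact hs v hv
        · omega
      · rw [pv_count_append_singleton, if_pos rfl, hcx]; simp
    · intro v
      rw [hmemx v, pv_count_append_singleton]
      by_cases hc : hmc ≤ (1 : Int)
      · rw [if_pos hc, PySem.Set.mem_add, h3 v]
        by_cases hv : v = x
        · subst hv
          rw [if_pos rfl]
          constructor
          · intro _; exact ⟨Or.inr rfl, by omega⟩
          · intro _; exact Or.inr rfl
        · simp only [if_neg hv]
          constructor
          · rintro (⟨hm, hcv⟩ | hveq)
            · exact ⟨Or.inl hm, by omega⟩
            · exact absurd hveq hv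
          · rintro ⟨hm | hm, hcv⟩
            · exact Or.inl ⟨hm, by omega⟩
            · exact absurd hm hv
      · rw [if_neg hc, h3 v]
        by_cases hv : v = x
        · subst hv
          rw [if_pos rfl]
          constructor
          · rintro ⟨hm, _⟩; exact absurd hm hxnot
          · rintro ⟨_, hcv⟩; omega
        · simp only [if_neg hv]
          constructor
          · rintro ⟨hm, hcv⟩; exact ⟨Or.inl hm, by omega⟩
          · rintro ⟨hm | hm, hcv⟩
            · exact ⟨hm, by omega⟩
            · exact absurd hm hv

lemma pvInv_foldl (hmc : Int) : ∀ (rest p : List Int) (st : Option Int × Int × PySem.Set Int),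
    (p ++ rest).Pairwise (· ≤ ·) → pvInv hmc p st → pvInv hmc (p ++ rest) (rest.foldl (pvStep hmc) st) := by
  intro rest
  induction rest with
  | nil => intro p st _ h; simpa using h
  | cons x rest' ih =>
    intro p st hpw h
    have hs : ∀ v ∈ p, v ≤ x := by
      have := (List.pairwise_append.mp hpw).2.2
      intro v hv; exact this v hv x (by simp)
    have hpw' : ((p ++ [x]) ++ rest').Pairwise (· ≤ ·) := by
      rw [List.append_assoc]; simpa using hpw
    have := ih (p ++ [x]) (pvStep hmc st x) hpw' (pvInv_step hmc p x st hs h)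
    simpa [List.append_assoc] using this

lemma pv_hot_mem (hmc : Int) (s : List Int) (hs : s.Pairwise (· ≤ ·)) (v : Int) :
    v ∈ (s.foldl (pvStep hmc) (none, 0, PySem.Set.empty)).2.2 ↔ v ∈ s ∧ hmc ≤ (s.count v : Int) := by
  have hinit : pvInv hmc [] ((none, 0, PySem.Set.empty) : Option Int × Int × PySem.Set Int) := by
    refine ⟨fun _ => ⟨rfl, rfl⟩, by simp, by simp [PySem.Set.empty]⟩
  have := pvInv_foldl hmc s [] _ (by simpa using hs) hinit
  simpa using this.2.2 v

-- A's hot-set membership: n is hot iff it occurs in the flattened window at least hmc times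
lemma pv_hotA_mem (flat : List Int) (hmc n : Int) :
    n ∈ (((PySem.Dict.counter flat).items.filter (fun p => decide (hmc ≤ p.2))).map (fun p => p.1)) ↔
      n ∈ flat ∧ hmc ≤ (flat.count n : Int) := by
  rw [PySem.Dict.items_counter]
  constructor
  · intro h
    obtain ⟨p, hp, rfl⟩ := List.mem_map.mp h
    obtain ⟨hpi, hple⟩ := List.mem_filter.mp hp
    obtain ⟨k, hk, rfl⟩ := List.mem_map.mp hpi
    exact ⟨(PySem.Set.mem_ofList _ _).mp hk, by simpa using hple⟩
  · rintro ⟨hmem, hle⟩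
    exact List.mem_map.mpr ⟨(n, (flat.count n : Int)), List.mem_filter.mpr
      ⟨List.mem_map.mpr ⟨n, (PySem.Set.mem_ofList _ _).mpr hmem, rfl⟩, by simpa using hle⟩, rfl⟩

-- both programs reduce to 'need ≤ countP (mem flat ∧ hmc ≤ count) (set nums)' once 'recent' is fixed
theorem loto7_hot_mix_key (nums : List Int) (recent : List (List Int)) (hmc need : Int) :
    (decide (need ≤ (PySem.Set.len (PySem.Set.inter (PySem.Set.ofList nums)
      (PySem.Set.ofList ((((recent.foldl (fun d draw => draw.foldl (fun d n => d.insert n (d.getD n 0 + 1)) d) PySem.Dict.empty).items.filter (fun p => hmc ≤ p.2))).map (fun p => p.1)))) : Int)))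
    = (decide (need ≤ (((PySem.Set.ofList nums).filter (fun n =>
        ((PySem.List.sorted (recent.flatMap (fun draw => draw)) (fun x => x) false).foldl (pvStep hmc) (none, 0, PySem.Set.empty)).2.2.contains n)).map (fun _ => (1 : Int))).sum)) := by
  rw [← List.foldl_flatten, PySem.Dict.foldl_insert_getD_add_one_eq_counter]
  set flat := recent.flatten with hflat
  have hfm : recent.flatMap (fun draw => draw) = flat := by simp [hflat]
  rw [hfm]
  set srt := PySem.List.sorted flat (fun x => x) false with hsrt
  have hperm : srt.Perm flat := PySem.List.sorted_perm flat (fun x => x) false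
  have hpw : srt.Pairwise (· ≤ ·) := PySem.List.sorted_pairwise flat (fun x => x)
  -- B's count: sum of ones over the filter = countP of hot membership
  have hB : (((PySem.Set.ofList nums).filter (fun n =>
        (srt.foldl (pvStep hmc) (none, 0, PySem.Set.empty)).2.2.contains n)).map (fun _ => (1 : Int))).sum
      = ((PySem.Set.ofList nums).countP (fun n => decide (n ∈ flat ∧ hmc ≤ (flat.count n : Int))) : Int) := by
    rw [PySem.List.sum_map_const_int]
    rw [mul_one, ← List.countP_eq_length_filter]
    congr 1
    apply List.countP_congr
    intro n _
    rw [Bool.eq_iff_iff]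
    simp only [PySem.Set.contains_iff, decide_eq_true_eq]
    rw [pv_hot_mem hmc srt hpw n, hperm.mem_iff, hperm.count_eq]
    simp
  -- A's count: size of the intersection = the same countP
  have hA : PySem.Set.len (PySem.Set.inter (PySem.Set.ofList nums)
      (PySem.Set.ofList (((PySem.Dict.counter flat).items.filter (fun p => decide (hmc ≤ p.2))).map (fun p => p.1))))
      = ((PySem.Set.ofList nums).countP (fun n => decide (n ∈ flat ∧ hmc ≤ (flat.count n : Int))) : Int) := by
    unfold PySem.Set.len PySem.Set.inter
    rw [← List.countP_eq_length_filter]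
    congr 1
    apply List.countP_congr
    intro n _
    rw [Bool.eq_iff_iff]
    simp only [PySem.Set.contains_iff, PySem.Set.mem_ofList, decide_eq_true_eq, iff_true]
    exact pv_hotA_mem flat hmc n
  rw [hA, hB]

-- ===== VERDICT (by name: the statement is the Claim_ definition above) =====
theorem loto7_hot_mix_spec : Claim_equal_loto7_hot_mix := by
  intro nums past window hmc need _
  unfold Spec_loto7_hot_mix loto7_hot_mix loto7_hot_mix_alt
  exact loto7_hot_mix_key nums _ hmc need
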